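-- pv_equiv track=rewrite | github.com/williamtrang/DSC20 | homeworks/hw02/hw02.py | playlist_password
-- ===== SOURCE A (Python) =====
-- def playlist_password(playlist_name, limit):
--     """
--     # Takes in a string representing playlist name
--     # and an integer character limit. Generates and
--     # returns a string by defined rules that has a
--     # length less than or equal to the character limit.
--
--     >>> playlist_password("World's Best Lasagne", 10)
--     'eBsd7rwost'
--     >>> playlist_password('Baked Casserole', 12)
--     'oraCdaBkesse'
--     >>> playlist_password('Hash browns', 11)
--     'orb4s4awns'
--
--     # Add at least 3 doctests below here #
--     >>> playlist_password('',  7)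
--     ''
--     >>> playlist_password('HAP"P%Y N#EW Y"EA!!R!L!', 10)
--     'EYwA4PPYNE'
--     >>> playlist_password('hppy nw yr', 20)
--     '4ppynwyr'
--     >>> playlist_password('brEkf', 10)
--     'Erbkf'
--     >>> playlist_password('a', 20)
--     'a'
--     >>> playlist_password('aEiOuDWIK,,Lh', 20)
--     'IwdOEaiuk74'
--     """
--     password = ''
--     vowel_list = ['a', 'e', 'i', 'o', 'u']
--     lower_list = ['d', 'w', 'k']
--
--     if len(playlist_name) == 0:
--         return ''
--
--     for i in playlist_name:
--         if len(password) >= limit: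
--             return password
--
--         if not i.isalnum():
--             continue
--
--         if i.lower() in vowel_list:
--             password = (password + i)[::-1]
--         elif i.lower() in lower_list:
--             password += i.lower()
--         elif i.upper() == 'L':
--             password += '7'
--         elif i.upper() == 'H':
--             password += '4'
--         else:
--             password += i
--     return password
-- ===== SOURCE B (Python) =====
-- def playlist_password(playlist_name, limit):
--     # Different algorithm: instead of reversing the growing password on each
--     # vowel (A), translate/filter/truncate into a token stream, then place each
--     # token directly on its final side: a token that will be flipped an odd
--     # number of times afterwards ends up (reversed) at the front, an even
--     # number of times at the back. One O(n) pass, no reversals in the loop.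
--     SUB = {'l': '7', 'h': '4'}
--     tokens = []
--     for ch in playlist_name:
--         if len(tokens) >= limit:
--             break
--         if ch.isalnum():
--             low = ch.lower()
--             if low in 'aeiou':
--                 tokens.append((ch, True))
--             elif low in 'dwk':
--                 tokens.append((low, False))
--             else:
--                 tokens.append((SUB.get(low, ch), False))
--     flips = sum(v for _, v in tokens)
--     head, tail = [], []
--     for ch, vowel in tokens:
--         if vowel:
--             (head if flips % 2 else tail).append(ch)
--             flips -= 1
--         else:
--             (tail if flips % 2 == 0 else head).append(ch)
--     return ''.join(reversed(head)) + ''.join(tail)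
-- ===== Notes on version B (the rewrite author's own statement) =====
-- stated objective: faster
-- what changed: Instead of reversing the whole growing password on each vowel, B first tokenizes (translate/filter/truncate, with the l/h substitutions as a dict lookup) and then places each token directly on its final side using the parity of the reversals still to come, so the loop does no reversal at all; the result is assembled once at the end.
import Mathlib
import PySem

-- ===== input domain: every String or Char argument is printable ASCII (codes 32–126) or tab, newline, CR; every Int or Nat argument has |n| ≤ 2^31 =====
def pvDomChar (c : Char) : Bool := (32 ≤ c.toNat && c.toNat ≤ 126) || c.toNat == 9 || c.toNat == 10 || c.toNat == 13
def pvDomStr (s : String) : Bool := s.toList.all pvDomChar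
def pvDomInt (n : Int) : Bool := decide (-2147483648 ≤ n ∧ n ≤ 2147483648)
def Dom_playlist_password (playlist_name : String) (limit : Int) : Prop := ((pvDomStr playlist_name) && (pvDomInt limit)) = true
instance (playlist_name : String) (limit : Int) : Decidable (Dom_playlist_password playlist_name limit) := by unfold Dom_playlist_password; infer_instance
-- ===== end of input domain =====

-- B replaces A's whole-password reversal on each vowel by a staged algorithm:
-- tokenize (translate/filter/truncate), then place every token directly on its
-- final side by the parity of the reversals still to come (one linear pass);
-- a timing run measures whether this is faster — see claim.json.


-- ===== PORT A =====
-- A's single loop: password built so far; early return on limit, continue on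
-- non-alnum, vowel reverses (password + i), the other branches append.
def pvALoop (limit : Int) : List Char → List Char → List Char
  | [], pw => pw
  | c :: cs, pw =>
    if limit ≤ (pw.length : Int) then pw
    else if ¬ PySem.Chars.isalnum c then pvALoop limit cs pw
    else if PySem.Chars.lowerChar c ∈ ['a', 'e', 'i', 'o', 'u'] then
      pvALoop limit cs ((pw ++ [c]).reverse)
    else if PySem.Chars.lowerChar c ∈ ['d', 'w', 'k'] then
      pvALoop limit cs (pw ++ [PySem.Chars.lowerChar c])
    else if PySem.Chars.upperChar c = 'L' then pvALoop limit cs (pw ++ ['7'])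
    else if PySem.Chars.upperChar c = 'H' then pvALoop limit cs (pw ++ ['4'])
    else pvALoop limit cs (pw ++ [c])

def playlist_password (playlist_name : String) (limit : Int) : String :=
  if playlist_name.toList.length = 0 then ""
  else String.ofList (pvALoop limit playlist_name.toList [])

-- ===== PORT B =====
-- B's SUB dict {'l': '7', 'h': '4'}
def pvSUB : PySem.Dict Char Char := PySem.Dict.ofList [('l', '7'), ('h', '4')]

-- B's pass 1: translate/filter/truncate into (char, is_vowel) tokens;
-- n is len(tokens) so far (low in 'aeiou' is char membership: low is one char).
def pvTokens (limit : Int) (n : Int) : List Char → List (Char × Bool)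
  | [] => []
  | c :: cs =>
    if limit ≤ n then []
    else if PySem.Chars.isalnum c then
      if PySem.Chars.lowerChar c ∈ "aeiou".toList then (c, true) :: pvTokens limit (n + 1) cs
      else if PySem.Chars.lowerChar c ∈ "dwk".toList then
        (PySem.Chars.lowerChar c, false) :: pvTokens limit (n + 1) cs
      else (pvSUB.getD (PySem.Chars.lowerChar c) c, false) :: pvTokens limit (n + 1) cs
    else pvTokens limit n cs

-- B's pass-2 loop body: place the token on head or tail by the parity of the
-- reversals still to come (flips); a vowel consumes one flip.
def pvPlaceStep (st : Int × List Char × List Char) (t : Char × Bool) : Int × List Char × List Char :=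
  if t.2 then
    (st.1 - 1,
     if PySem.Int.mod st.1 2 ≠ 0 then (st.2.1 ++ [t.1], st.2.2) else (st.2.1, st.2.2 ++ [t.1]))
  else
    (st.1,
     if PySem.Int.mod st.1 2 = 0 then (st.2.1, st.2.2 ++ [t.1]) else (st.2.1 ++ [t.1], st.2.2))

def playlist_password_alt (playlist_name : String) (limit : Int) : String :=
  let ts := pvTokens limit 0 playlist_name.toList
  let flips : Int := (ts.map (fun t => if t.2 then (1 : Int) else 0)).sum
  let st := ts.foldl pvPlaceStep (flips, [], [])
  String.ofList (st.2.1.reverse ++ st.2.2)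

-- ===== PRECONDITION & SPEC =====
def Spec_playlist_password (playlist_name : String) (limit : Int) (out : String) : Prop := out = playlist_password_alt playlist_name limit
instance (playlist_name : String) (limit : Int) (out : String) : Decidable (Spec_playlist_password playlist_name limit out) := by unfold Spec_playlist_password; infer_instance

-- ===== CLAIM (what is proved, stated in full; the proofs are below) =====
def Claim_equal_playlist_password : Prop := ∀ (playlist_name : String) (limit : Int), Dom_playlist_password playlist_name limit → Spec_playlist_password playlist_name limit (playlist_password playlist_name limit)

-- ===== LEMMAS AND PROOFS =====

-- A's per-token action on the password.
def pvStep (pw : List Char) (t : Char × Bool) : List Char :=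
  if t.2 then (pw ++ [t.1]).reverse else pw ++ [t.1]

-- number of vowels in a token list
def pvCV (ts : List (Char × Bool)) : Nat := ts.countP (·.2)

-- tokens ending up at the front (in append order) / at the back
def pvHead : List (Char × Bool) → List Char
  | [] => []
  | (c, v) :: ts =>
    if v then (if pvCV ts % 2 = 0 then c :: pvHead ts else pvHead ts)
    else (if pvCV ts % 2 = 0 then pvHead ts else c :: pvHead ts)

def pvTail : List (Char × Bool) → List Char
  | [] => []
  | (c, v) :: ts =>
    if v then (if pvCV ts % 2 = 0 then pvTail ts else c :: pvTail ts)
    else (if pvCV ts % 2 = 0 then c :: pvTail ts else pvTail ts)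

theorem pvCharEqIffToNat (c d : Char) : c = d ↔ c.toNat = d.toNat := by
  constructor
  · intro h; rw [h]
  · intro h; apply Char.ext; rw [← UInt32.toNat_inj]; exact h

theorem pvCharLeToNat (c d : Char) : c ≤ d ↔ c.toNat ≤ d.toNat := by
  rw [Char.le_def, UInt32.le_iff_toNat_le]; rfl

theorem pvToNat_ofNat_small (n : Nat) (h : n < 1000) : (Char.ofNat n).toNat = n := by
  rw [Char.toNat_ofNat, if_pos (Or.inl (by omega))]

-- A tests i.upper() == 'L' / 'H'; B keys its dict by i.lower(): same characters.
theorem pv_upper_lower_iff (c u l : Char) (hu1 : 65 ≤ u.toNat) (hu2 : u.toNat ≤ 90)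
    (hl : l.toNat = u.toNat + 32) :
    (PySem.Chars.upperChar c = u) ↔ (PySem.Chars.lowerChar c = l) := by
  unfold PySem.Chars.upperChar PySem.Chars.lowerChar PySem.Chars.islower PySem.Chars.isupper
  have ha : ('a' : Char).toNat = 97 := rfl
  have hz : ('z' : Char).toNat = 122 := rfl
  have hA : ('A' : Char).toNat = 65 := rfl
  have hZ : ('Z' : Char).toNat = 90 := rfl
  split_ifs with h1 h2 <;>
    simp only [Bool.and_eq_true, decide_eq_true_eq, pvCharLeToNat, pvCharEqIffToNat,
      ha, hz, hA, hZ, hl] at * <;>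
    (try rw [pvToNat_ofNat_small _ (by omega)]) <;> omega

-- A's else-cascade computes exactly B's dict lookup.
theorem pvSUB_getD (c : Char) :
    pvSUB.getD (PySem.Chars.lowerChar c) c =
      if PySem.Chars.upperChar c = 'L' then '7'
      else if PySem.Chars.upperChar c = 'H' then '4' else c := by
  have hL := pv_upper_lower_iff c 'L' 'l' (by decide) (by decide) (by decide)
  have hH := pv_upper_lower_iff c 'H' 'h' (by decide) (by decide) (by decide)
  simp only [hL, hH]
  by_cases h1 : PySem.Chars.lowerChar c = 'l'
  · rw [h1, if_pos rfl]; rfl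
  · rw [if_neg h1]
    by_cases h2 : PySem.Chars.lowerChar c = 'h'
    · rw [h2, if_pos rfl]; rfl
    · rw [if_neg h2]
      simp [pvSUB, PySem.Dict.ofList, PySem.Dict.update, PySem.Dict.getD_eq_get?_getD,
        PySem.Dict.get?_insert, PySem.Dict.get?_empty, h1, h2]

-- A's loop is the fold of pvStep over B's token stream.
theorem pvALoop_eq_fold (limit : Int) (cs : List Char) : ∀ (pw : List Char),
    pvALoop limit cs pw = List.foldl pvStep pw (pvTokens limit (pw.length : Int) cs) := by
  induction cs with
  | nil => intro pw; simp [pvALoop, pvTokens]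
  | cons c cs ih =>
    intro pw
    rw [pvALoop, pvTokens]
    simp only [show "aeiou".toList = ['a', 'e', 'i', 'o', 'u'] from rfl,
      show "dwk".toList = ['d', 'w', 'k'] from rfl]
    by_cases hlim : limit ≤ (pw.length : Int)
    · simp [hlim]
    · rw [if_neg hlim, if_neg hlim]
      by_cases han : PySem.Chars.isalnum c
      · rw [if_neg (by simp [han]), if_pos han]
        by_cases hv : PySem.Chars.lowerChar c ∈ ['a', 'e', 'i', 'o', 'u']
        · rw [if_pos hv, if_pos hv, List.foldl_cons, ih]
          have hstep : pvStep pw (c, true) = (pw ++ [c]).reverse := rfl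
          rw [hstep]
          have hlen : (((pw ++ [c]).reverse.length : Nat) : Int) = (pw.length : Int) + 1 := by
            simp
          rw [hlen]
        · rw [if_neg hv, if_neg hv]
          by_cases hd : PySem.Chars.lowerChar c ∈ ['d', 'w', 'k']
          · rw [if_pos hd, if_pos hd, List.foldl_cons, ih]
            have hstep : pvStep pw (PySem.Chars.lowerChar c, false)
                = pw ++ [PySem.Chars.lowerChar c] := rfl
            rw [hstep]
            have hlen : (((pw ++ [PySem.Chars.lowerChar c]).length : Nat) : Int)
                = (pw.length : Int) + 1 := by simp
            rw [hlen]
          · rw [if_neg hd, if_neg hd, List.foldl_cons]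
            have hstep : ∀ x : Char, pvStep pw (x, false) = pw ++ [x] := fun _ => rfl
            rw [hstep, pvSUB_getD c]
            have hlen : ∀ x : Char, (((pw ++ [x]).length : Nat) : Int)
                = (pw.length : Int) + 1 := by intro x; simp
            by_cases hLc : PySem.Chars.upperChar c = 'L'
            · rw [if_pos hLc, if_pos hLc, ih, hlen]
            · rw [if_neg hLc, if_neg hLc]
              by_cases hHc : PySem.Chars.upperChar c = 'H'
              · rw [if_pos hHc, if_pos hHc, ih, hlen]
              · rw [if_neg hHc, if_neg hHc, ih, hlen]
      · rw [if_pos (by simp [han]), if_neg han]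
        exact ih pw

-- the fold of pvStep is head/tail placement around the (possibly reversed) seed
theorem pvFold_eq_place (ts : List (Char × Bool)) : ∀ (pw : List Char),
    List.foldl pvStep pw ts =
      (pvHead ts).reverse ++ (if pvCV ts % 2 = 0 then pw else pw.reverse) ++ pvTail ts := by
  induction ts with
  | nil => intro pw; simp [pvHead, pvTail, pvCV]
  | cons t ts ih =>
    intro pw
    obtain ⟨c, v⟩ := t
    rw [List.foldl_cons, ih]
    cases v with
    | false =>
      have hc : pvCV ((c, false) :: ts) = pvCV ts := by simp [pvCV]
      by_cases hp : pvCV ts % 2 = 0 <;>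
        simp [pvHead, pvTail, hc, hp, pvStep, List.reverse_append]
    | true =>
      have hc : pvCV ((c, true) :: ts) = pvCV ts + 1 := by simp [pvCV]
      have hpar : (pvCV ts + 1) % 2 = 0 ↔ ¬ (pvCV ts % 2 = 0) := by omega
      by_cases hp : pvCV ts % 2 = 0 <;>
        simp [pvHead, pvTail, hc, hp, hpar, pvStep, List.reverse_append]

-- B's placement loop computes pvHead/pvTail
theorem pvPlace_eq (ts : List (Char × Bool)) : ∀ (head tail : List Char),
    ts.foldl pvPlaceStep ((pvCV ts : Int), head, tail) =
      (0, head ++ pvHead ts, tail ++ pvTail ts) := by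
  induction ts with
  | nil => intro head tail; simp [pvHead, pvTail, pvCV]
  | cons t ts ih =>
    intro head tail
    obtain ⟨c, v⟩ := t
    rw [List.foldl_cons]
    cases v with
    | false =>
      have hc : pvCV ((c, false) :: ts) = pvCV ts := by simp [pvCV]
      rw [hc]
      by_cases hp : pvCV ts % 2 = 0
      · rw [show pvPlaceStep ((pvCV ts : Int), head, tail) (c, false)
            = ((pvCV ts : Int), head, tail ++ [c]) from by
          simp [pvPlaceStep]
          all_goals omega]
        rw [ih]
        simp [pvHead, pvTail, hp]
      · rw [show pvPlaceStep ((pvCV ts : Int), head, tail) (c, false)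
            = ((pvCV ts : Int), head ++ [c], tail) from by
          simp [pvPlaceStep]
          all_goals omega]
        rw [ih]
        simp [pvHead, pvTail, hp]
    | true =>
      have hc : pvCV ((c, true) :: ts) = pvCV ts + 1 := by simp [pvCV]
      rw [hc]
      by_cases hp : pvCV ts % 2 = 0
      · rw [show pvPlaceStep (((pvCV ts + 1 : Nat) : Int), head, tail) (c, true)
            = ((pvCV ts : Int), head ++ [c], tail) from by
          simp [pvPlaceStep]
          all_goals omega]
        rw [ih]
        simp [pvHead, pvTail, hp]
      · rw [show pvPlaceStep (((pvCV ts + 1 : Nat) : Int), head, tail) (c, true)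
            = ((pvCV ts : Int), head, tail ++ [c]) from by
          simp [pvPlaceStep]
          all_goals omega]
        rw [ih]
        simp [pvHead, pvTail, hp]

theorem pvFlips_eq (ts : List (Char × Bool)) :
    (ts.map (fun t => if t.2 then (1 : Int) else 0)).sum = (pvCV ts : Int) := by
  simp [pvCV, PySem.List.sum_map_ite_one_zero]

theorem pv_main (playlist_name : String) (limit : Int) :
    playlist_password playlist_name limit = playlist_password_alt playlist_name limit := by
  simp only [playlist_password, playlist_password_alt]
  cases h : playlist_name.toList with
  | nil => simp [pvTokens]
  | cons c cs =>
    rw [if_neg (by simp)]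
    rw [pvALoop_eq_fold]
    simp only [List.length_nil, Nat.cast_zero]
    rw [pvFold_eq_place, pvFlips_eq, pvPlace_eq]
    by_cases hp : pvCV (pvTokens limit 0 (c :: cs)) % 2 = 0 <;> simp [hp]

-- ===== VERDICT (by name: the statement is the Claim_ definition above) =====
theorem playlist_password_spec : Claim_equal_playlist_password := by
  intro s limit _
  unfold Spec_playlist_password
  exact pv_main s limit
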